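-- pv_equiv track=rewrite | github.com/tanmayagarwal1/Code | Algorithms/CompleteArrays_raw.py | EqualPilesHeight
-- ===== SOURCE A (Python) =====
-- def EqualPilesHeight(arr):
-- 	if not arr : raise ValueError
-- 	arr.sort(reverse = True)
-- 	count = 0
-- 	for i in range(1, len(arr)):
-- 		if arr[i - 1] != arr[i]:
-- 			count += i
-- 	return count
-- ===== SOURCE B (Python) =====
-- def EqualPilesHeight(arr):
--     if not arr:
--         raise ValueError
--     arr.sort(reverse=True)
--     # run-length encode the sorted array, then sum the prefix counts
--     sizes = []
--     prev = arr[0]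
--     run = 0
--     for x in arr:
--         if x == prev:
--             run += 1
--         else:
--             sizes.append(run)
--             prev = x
--             run = 1
--     sizes.append(run)
--     seen = 0
--     count = 0
--     for size in sizes[:-1]:
--         seen += size
--         count += seen
--     return count
-- ===== Notes on version B (the rewrite author's own statement) =====
-- stated objective: alternative
-- what changed: Instead of summing the boundary indices i where the descending-sorted array changes value, B run-length-encodes the sorted array into group sizes and sums the running prefix counts over all groups but the last.
import Mathlib
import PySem

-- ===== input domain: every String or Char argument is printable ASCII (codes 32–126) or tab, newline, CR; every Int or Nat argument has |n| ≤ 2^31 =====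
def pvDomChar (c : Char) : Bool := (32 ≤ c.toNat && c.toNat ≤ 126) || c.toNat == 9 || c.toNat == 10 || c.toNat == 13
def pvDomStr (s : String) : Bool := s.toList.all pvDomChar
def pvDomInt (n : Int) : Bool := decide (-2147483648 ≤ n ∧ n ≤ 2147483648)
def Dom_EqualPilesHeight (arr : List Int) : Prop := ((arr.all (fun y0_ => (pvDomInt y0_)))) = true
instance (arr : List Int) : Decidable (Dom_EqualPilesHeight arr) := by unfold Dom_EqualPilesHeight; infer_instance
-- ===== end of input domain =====

-- B replaces A's boundary-index summation by run-length encoding + prefix-count summation (objective: alternative).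
-- Both Pythons sort arr in place (observable mutation); the equivalence proved here is about the return value.

-- ===== PORT A =====
-- 'if not arr: raise ValueError' is excluded by Pre_EqualPilesHeight.
def EqualPilesHeight (arr : List Int) : Int :=
  let s := PySem.List.sorted arr (fun x => x) true
  (PySem.List.pyRange 1 (s.length : Int) 1).foldl
    (fun count i =>
      if PySem.List.pyGetD s (i - 1) 0 ≠ PySem.List.pyGetD s i 0 then count + i else count)
    0

-- ===== PORT B =====
-- 'if not arr: raise ValueError' is excluded by Pre_EqualPilesHeight (the [] branch is unreachable there).
def EqualPilesHeight_alt (arr : List Int) : Int :=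
  let s := PySem.List.sorted arr (fun x => x) true
  match s with
  | [] => 0
  | a :: _ =>
    -- first loop: run-length encode s into sizes, state (sizes, prev, run)
    let st := s.foldl
      (fun (st : List Int × Int × Int) x =>
        if x = st.2.1 then (st.1, st.2.1, st.2.2 + 1)
        else (st.1 ++ [st.2.2], x, 1))
      ([], a, 0)
    let sizes := st.1 ++ [st.2.2]
    -- second loop: for size in sizes[:-1]: seen += size; count += seen
    (sizes.dropLast.foldl (fun (sc : Int × Int) size => (sc.1 + size, sc.2 + sc.1 + size)) (0, 0)).2

-- ===== PRECONDITION & SPEC =====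
-- Pre_ excludes exactly the empty list, on which Python A raises ValueError.
def Pre_EqualPilesHeight (arr : List Int) : Prop := arr ≠ []
instance (arr : List Int) : Decidable (Pre_EqualPilesHeight arr) := by unfold Pre_EqualPilesHeight; infer_instance
def pvWitness_EqualPilesHeight : List Int := [2, 1, 1]

def Spec_EqualPilesHeight (arr : List Int) (out : Int) : Prop := out = EqualPilesHeight_alt arr
instance (arr : List Int) (out : Int) : Decidable (Spec_EqualPilesHeight arr out) := by unfold Spec_EqualPilesHeight; infer_instance

-- ===== CLAIM (what is proved, stated in full; the proofs are below) =====
def Claim_equal_EqualPilesHeight : Prop := ∀ (arr : List Int), Dom_EqualPilesHeight arr → Pre_EqualPilesHeight arr → Spec_EqualPilesHeight arr (EqualPilesHeight arr)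

-- ===== LEMMAS AND PROOFS =====

/-- A's loop, structurally: sum of positions i (starting at `i`) where adjacent values differ. -/
def pvAuxA : Int → List Int → Int
  | i, a :: b :: t => (if a ≠ b then i else 0) + pvAuxA (i + 1) (b :: t)
  | _, _ => 0

/-- B's first loop, structurally: run lengths of `t`, entered with current run (`prev`, `run`). -/
def pvRuns : Int → Int → List Int → List Int
  | _, run, [] => [run]
  | prev, run, x :: t => if x = prev then pvRuns prev (run + 1) t else run :: pvRuns x 1 t

/-- B's second loop, structurally. -/
def pvCountB : Int → Int → List Int → Int
  | _, c, [] => c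
  | seen, c, sz :: rest => pvCountB (seen + sz) (c + seen + sz) rest

theorem pvRuns_ne_nil (prev run : Int) (t : List Int) : pvRuns prev run t ≠ [] := by
  induction t generalizing prev run with
  | nil => simp [pvRuns]
  | cons x t ih =>
      simp only [pvRuns]
      split
      · exact ih _ _
      · simp

theorem pvFoldRuns (xs : List Int) : ∀ (sizes : List Int) (prev run : Int),
    (xs.foldl
      (fun (st : List Int × Int × Int) x =>
        if x = st.2.1 then (st.1, st.2.1, st.2.2 + 1)
        else (st.1 ++ [st.2.2], x, 1))
      (sizes, prev, run)).1 ++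
    [(xs.foldl
      (fun (st : List Int × Int × Int) x =>
        if x = st.2.1 then (st.1, st.2.1, st.2.2 + 1)
        else (st.1 ++ [st.2.2], x, 1))
      (sizes, prev, run)).2.2] = sizes ++ pvRuns prev run xs := by
  induction xs with
  | nil => intro sizes prev run; simp [pvRuns]
  | cons x t ih =>
      intro sizes prev run
      simp only [List.foldl_cons, pvRuns]
      by_cases hx : x = prev
      · simp only [hx, if_true]
        exact ih sizes prev (run + 1)
      · simp only [if_neg hx, ih (sizes ++ [run]) x 1, List.append_assoc,
          List.singleton_append]
      
theorem pvFoldCount (l : List Int) : ∀ (seen c : Int),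
    (l.foldl (fun (sc : Int × Int) size => (sc.1 + size, sc.2 + sc.1 + size)) (seen, c)).2
      = pvCountB seen c l := by
  induction l with
  | nil => intro seen c; simp [pvCountB]
  | cons sz rest ih => intro seen c; simpa [pvCountB] using ih (seen + sz) (c + seen + sz)

theorem pvFoldA (s t : List Int) : ∀ (pre : List Int) (a c : Int),
    s = pre ++ t → pre.getLast? = some a →
    (PySem.List.pyRange (pre.length : Int) (s.length : Int) 1).foldl
      (fun count i =>
        if PySem.List.pyGetD s (i - 1) 0 ≠ PySem.List.pyGetD s i 0 then count + i else count) c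
    = c + pvAuxA (pre.length : Int) (a :: t) := by
  induction t with
  | nil =>
      intro pre a c hs _
      have hlen : (s.length : Int) ≤ (pre.length : Int) := by simp [hs]
      rw [PySem.List.pyRange_one_eq_nil hlen]
      simp [pvAuxA]
  | cons x t ih =>
      intro pre a c hs hlast
      have hpre : pre ≠ [] := by intro h; simp [h] at hlast
      have hlt : (pre.length : Int) < (s.length : Int) := by
        simp [hs]
      rw [PySem.List.pyRange_one_cons hlt]
      simp only [List.foldl_cons]
      -- the two lookups
      have hget1 : PySem.List.pyGetD s ((pre.length : Int) - 1) 0 = a := by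
        have h1 : ((pre.length : Int) - 1) = ((pre.length - 1 : Nat) : Int) := by
          have := List.length_pos_iff.mpr hpre; omega
        rw [h1, PySem.List.pyGetD_natCast]
        have hlt' : pre.length - 1 < pre.length := by
          have := List.length_pos_iff.mpr hpre; omega
        have : s[pre.length - 1]? = pre[pre.length - 1]? := by
          rw [hs]; exact List.getElem?_append_left hlt'
        simp [List.getD, this, ← List.getLast?_eq_getElem?, hlast]
      have hget2 : PySem.List.pyGetD s ((pre.length : Int)) 0 = x := by
        rw [PySem.List.pyGetD_natCast]
        have : s[pre.length]? = some x := by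
          rw [hs, List.getElem?_append_right (le_refl _)]
          simp
        simp [List.getD, this]
      rw [hget1, hget2]
      have hs' : s = (pre ++ [x]) ++ t := by simp [hs]
      have hlast' : (pre ++ [x]).getLast? = some x := by simp
      have hlen' : ((pre ++ [x]).length : Int) = (pre.length : Int) + 1 := by
        simp
      have := ih (pre ++ [x]) x
        (if a ≠ x then c + (pre.length : Int) else c) hs' hlast'
      rw [hlen'] at this
      rw [this]
      simp only [pvAuxA]
      by_cases hax : a = x
      · simp [hax]
      · simp only [ne_eq, hax, not_false_iff, if_pos]
        ring

theorem pvMain (t : List Int) : ∀ (prev run seen c : Int),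
    pvCountB seen c ((pvRuns prev run t).dropLast) = c + pvAuxA (seen + run) (prev :: t) := by
  induction t with
  | nil => intro prev run seen c; simp [pvRuns, pvCountB, pvAuxA]
  | cons x t ih =>
      intro prev run seen c
      simp only [pvRuns]
      by_cases hx : x = prev
      · subst hx
        rw [if_pos rfl, ih]
        simp only [pvAuxA]
        simp [add_assoc]
      · rw [if_neg hx,
          List.dropLast_cons_of_ne_nil (pvRuns_ne_nil x 1 t)]
        simp only [pvCountB]
        rw [ih]
        simp only [pvAuxA]
        have hpx : prev ≠ x := fun h => hx h.symm
        simp only [ne_eq, hpx, not_false_iff, if_pos]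
        ring

-- ===== VERDICT (by name: the statement is the Claim_ definition above) =====
theorem EqualPilesHeight_spec : Claim_equal_EqualPilesHeight := by
  intro arr _ hpre
  unfold Spec_EqualPilesHeight EqualPilesHeight EqualPilesHeight_alt
  set s := PySem.List.sorted arr (fun x => x) true with hsdef
  have hsne : s ≠ [] := by
    intro h
    apply hpre
    have hlen : s.length = arr.length := PySem.List.length_sorted (xs := arr) (key := fun x => x) (rev := true)
    rw [h] at hlen
    exact List.length_eq_zero_iff.mp hlen.symm
  obtain ⟨a, rest, hs⟩ := List.exists_cons_of_ne_nil hsne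
  simp only [hs]
  -- A side
  have hA := pvFoldA s rest [a] a 0 (by simp [hs]) (by simp)
  simp only [List.length_singleton, Nat.cast_one] at hA
  rw [hs] at hA
  rw [hA]
  -- B side
  rw [pvFoldRuns (a :: rest) [] a 0]
  simp only [List.nil_append, pvRuns, if_true]
  rw [pvFoldCount, pvMain]
  simp
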